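-- pv_equiv track=rewrite | github.com/siddharth1199/aoc_2017 | optum_aoc/2015/day08/h.py | getNbrNewEncode
-- ===== SOURCE A (Python) =====
-- def getNbrNewEncode(input_lst):
--     res = 0
--     for s in input_lst:
--         temp_len = 0
--         p = 0
--         n = len(s)
--         while p < n:
--             curr_char = s[p]
--             # check special character: ", \
--             if curr_char == '\"' or curr_char == '\\':
--                 temp_len += 1
--             temp_len += 1
--             p += 1
--         # always plus 2
--         temp_len += 2
--         res += temp_len
--     return res
-- ===== SOURCE B (Python) =====
-- def getNbrNewEncode(input_lst):
--     # Materialize the actual re-encoded string (escape table + surrounding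
--     # quotes) and measure its length, instead of counting characters.
--     tbl = str.maketrans({'"': '\\"', '\\': '\\\\'})
--     return sum(len('"' + s.translate(tbl) + '"') for s in input_lst)
-- ===== Notes on version B (the rewrite author's own statement) =====
-- stated objective: simpler
-- what changed: Instead of tallying a length counter over an indexed while-loop, B actually constructs each re-encoded string (a str.translate escape table plus surrounding quotes) and sums the lengths of the materialized results.
import Mathlib
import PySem

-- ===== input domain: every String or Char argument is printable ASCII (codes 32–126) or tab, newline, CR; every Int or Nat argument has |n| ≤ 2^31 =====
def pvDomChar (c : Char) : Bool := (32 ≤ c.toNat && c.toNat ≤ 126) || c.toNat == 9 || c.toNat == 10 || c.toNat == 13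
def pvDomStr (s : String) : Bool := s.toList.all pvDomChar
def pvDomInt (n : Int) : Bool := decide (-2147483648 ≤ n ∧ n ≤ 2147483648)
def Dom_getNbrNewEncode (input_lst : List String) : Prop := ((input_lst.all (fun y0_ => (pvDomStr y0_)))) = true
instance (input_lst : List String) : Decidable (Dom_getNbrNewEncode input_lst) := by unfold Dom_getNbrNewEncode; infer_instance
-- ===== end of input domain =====

-- B materializes each re-encoded string (escape table + surrounding quotes) and sums its length, instead of A's indexed counting loop (simpler decomposition, same cost).


-- ===== PORT A =====
-- inner 'while p < n' scan of s: structural recursion over the characters of s,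
-- carrying temp_len exactly as the Python does
def encLoop : List Char → Int → Int
  | [], temp_len => temp_len
  | c :: rest, temp_len =>
      encLoop rest ((if c == '"' || c == '\\' then temp_len + 1 else temp_len) + 1)

def getNbrNewEncode (input_lst : List String) : Int :=
  input_lst.foldl (fun res s => res + (encLoop s.toList 0 + 2)) 0

-- ===== PORT B =====
-- s.translate(tbl) with tbl mapping '"' ↦ '\"' and '\' ↦ '\\' is exactly a
-- per-character expansion: flatMap of this escape function over the characters
def escChar (c : Char) : List Char :=
  if c = '"' then ['\\', '"'] else if c = '\\' then ['\\', '\\'] else [c]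

def getNbrNewEncode_alt (input_lst : List String) : Int :=
  (input_lst.map (fun s =>
    ((('"' :: s.toList.flatMap escChar) ++ ['"']).length : Int))).sum

-- ===== PRECONDITION & SPEC =====
def Spec_getNbrNewEncode (input_lst : List String) (out : Int) : Prop := out = getNbrNewEncode_alt input_lst
instance (input_lst : List String) (out : Int) : Decidable (Spec_getNbrNewEncode input_lst out) := by unfold Spec_getNbrNewEncode; infer_instance

-- ===== CLAIM (what is proved, stated in full; the proofs are below) =====
def Claim_equal_getNbrNewEncode : Prop := ∀ (input_lst : List String), Dom_getNbrNewEncode input_lst → Spec_getNbrNewEncode input_lst (getNbrNewEncode input_lst)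

-- ===== LEMMAS AND PROOFS =====
theorem encLoop_eq (l : List Char) (t : Int) :
    encLoop l t = t + (l.flatMap escChar).length := by
  induction l generalizing t with
  | nil => simp [encLoop]
  | cons c rest ih =>
    simp only [encLoop, ih, List.flatMap_cons, List.length_append]
    by_cases h1 : c = '"' <;> by_cases h2 : c = '\\' <;>
      simp [h1, h2, escChar] <;> ring

theorem foldl_enc (ls : List String) (acc : Int) :
    ls.foldl (fun res s => res + (encLoop s.toList 0 + 2)) acc =
      acc + (ls.map (fun s =>
        ((('"' :: s.toList.flatMap escChar) ++ ['"']).length : Int))).sum := by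
  induction ls generalizing acc with
  | nil => simp
  | cons s rest ih =>
    rw [List.foldl_cons, ih, List.map_cons, List.sum_cons, encLoop_eq]
    simp [List.length_append]
    ring

-- ===== VERDICT (by name: the statement is the Claim_ definition above) =====
theorem getNbrNewEncode_spec : Claim_equal_getNbrNewEncode := by
  intro input_lst _
  unfold Spec_getNbrNewEncode getNbrNewEncode getNbrNewEncode_alt
  simp [foldl_enc]
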